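-- pv_equiv track=rewrite | github.com/nopparujp/2110101 | grader/2566_2_Quiz_2_1/main.py | less_offensive
-- ===== SOURCE A (Python) =====
-- def hide_vowel(w):
--     h = ""
--     for c in w:
--         if c.lower() in 'aeiou':
--             c = '*'
--         h += c
--     return h
--
-- def less_offensive(t, oword):
--     for i in range(len(t)):
--         l_oword = len(oword)
--         word = t[i: i + l_oword]
--         if l_oword == len(word) and word.lower() == oword.lower():
--             new_word = hide_vowel(word)
--             t = t[0:i] + new_word + t[i+l_oword:]
--     return t
-- ===== SOURCE B (Python) =====
-- def less_offensive(t, oword):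
--     lo = oword.lower()
--     m = len(lo)
--     star_lo = ''.join('*' if c in 'aeiou' else c for c in lo)
--     chars = list(t)
--     low = t.lower()
--     start = 0
--     while start <= len(low):
--         i = low.find(lo, start)
--         if i == -1:
--             break
--         chars[i:i+m] = ['*' if lc in 'aeiou' else c for lc, c in zip(lo, chars[i:i+m])]
--         low = low[:i] + star_lo + low[i+m:]
--         start = i + 1
--     return ''.join(chars)
-- ===== Notes on version B (the rewrite author's own statement) =====
-- stated objective: faster
-- what changed: B replaces A's per-index slice-compare-and-rebuild over the whole (repeatedly re-sliced) string with a str.find jump scan over a lowercase shadow text, splicing a precomputed starred pattern in at each hit.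
import Mathlib
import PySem

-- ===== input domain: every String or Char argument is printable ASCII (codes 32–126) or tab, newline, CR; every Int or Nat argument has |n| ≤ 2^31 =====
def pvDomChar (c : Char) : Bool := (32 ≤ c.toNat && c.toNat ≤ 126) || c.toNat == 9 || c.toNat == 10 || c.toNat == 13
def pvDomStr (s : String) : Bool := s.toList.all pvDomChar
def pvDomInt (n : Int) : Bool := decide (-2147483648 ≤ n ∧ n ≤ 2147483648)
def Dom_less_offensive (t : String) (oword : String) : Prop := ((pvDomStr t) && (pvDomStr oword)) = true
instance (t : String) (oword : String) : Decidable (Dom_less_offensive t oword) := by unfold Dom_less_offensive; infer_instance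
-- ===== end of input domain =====

-- B replaces A's rescan of every index with slicing/rebuilding of the whole string by a
-- str.find jump scan over a lowercase shadow text with a precomputed starred pattern (objective: faster, constant factor).

-- ===== PORT A =====
def pvVowels : List Char := ['a', 'e', 'i', 'o', 'u']

-- hide_vowel: h = ""; for c in w: if c.lower() in 'aeiou': c = '*'; h += c
def hideVowelA (w : List Char) : List Char :=
  w.foldl (fun h c => h ++ [if PySem.Chars.isIn (PySem.Chars.lower [c]) pvVowels then '*' else c]) []

-- one pass of A's loop body at index i (t is the current text)
def lessStepA (oword : List Char) (t : List Char) (i : Int) : List Char :=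
  let word := PySem.List.slice t (some i) (some (i + (oword.length : Int)))
  if oword.length = word.length ∧ PySem.Chars.lower word = PySem.Chars.lower oword then
    PySem.List.slice t (some 0) (some i) ++ hideVowelA word
      ++ PySem.List.slice t (some (i + (oword.length : Int))) none
  else t

def less_offensive (t : String) (oword : String) : String :=
  String.ofList ((PySem.List.pyRange 0 (t.toList.length : Int) 1).foldl (lessStepA oword.toList) t.toList)

-- ===== PORT B =====
-- the while loop of Source B: find lo in the lowercase shadow `low` from `start`, splice stars in
-- (fuel = one unit per loop pass; start grows every pass, so len(t)+1 units never run out)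
def goB (lo starLo : List Char) : Nat → List Char → List Char → Nat → List Char
  | 0, chars, _, _ => chars
  | fuel + 1, chars, low, start =>
    if start ≤ low.length then
      let i := PySem.Chars.findFrom low lo (start : Int) none
      if i = -1 then chars
      else
        goB lo starLo fuel
          (PySem.List.slice chars none (some i)
            ++ (lo.zip (PySem.List.slice chars (some i) (some (i + (lo.length : Int))))).map
                 (fun p => if PySem.Chars.isIn [p.1] pvVowels then '*' else p.2)
            ++ PySem.List.slice chars (some (i + (lo.length : Int))) none)
          (PySem.List.slice low none (some i) ++ starLo
            ++ PySem.List.slice low (some (i + (lo.length : Int))) none)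
          (i.toNat + 1)
    else chars

def less_offensive_alt (t : String) (oword : String) : String :=
  let lo := PySem.Chars.lower oword.toList
  let starLo := lo.map (fun c => if PySem.Chars.isIn [c] pvVowels then '*' else c)
  String.ofList (goB lo starLo (t.toList.length + 1) t.toList (PySem.Chars.lower t.toList) 0)

-- ===== PRECONDITION & SPEC =====
def Spec_less_offensive (t : String) (oword : String) (out : String) : Prop := out = less_offensive_alt t oword
instance (t : String) (oword : String) (out : String) : Decidable (Spec_less_offensive t oword out) := by unfold Spec_less_offensive; infer_instance

-- ===== CLAIM (what is proved, stated in full; the proofs are below) =====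
def Claim_equal_less_offensive : Prop := ∀ (t : String) (oword : String), Dom_less_offensive t oword → Spec_less_offensive t oword (less_offensive t oword)

-- ===== LEMMAS AND PROOFS =====

-- A's per-char starring function
def starA (c : Char) : Char := if PySem.Chars.isIn (PySem.Chars.lower [c]) pvVowels then '*' else c

lemma foldl_append_map {α β : Type} (g : α → β) :
    ∀ (w : List α) (acc : List β), w.foldl (fun h c => h ++ [g c]) acc = acc ++ w.map g := by
  intro w
  induction w with
  | nil => simp
  | cons c w ih => intro acc; simp [List.foldl_cons, ih]

lemma hideVowelA_eq_map (w : List Char) : hideVowelA w = w.map starA := by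
  unfold hideVowelA
  exact (foldl_append_map starA w []).trans (List.nil_append _)

lemma lower_eq_map (s : List Char) : PySem.Chars.lower s = s.map PySem.Chars.lowerChar := rfl

lemma lowerChar_starA (c : Char) :
    PySem.Chars.lowerChar (starA c) =
      (if PySem.Chars.isIn [PySem.Chars.lowerChar c] pvVowels then '*' else PySem.Chars.lowerChar c) := by
  unfold starA
  rw [show PySem.Chars.lower [c] = [PySem.Chars.lowerChar c] from rfl]
  split_ifs <;> rfl

-- A's match condition at a natural index k is exactly "lo is a prefix of the lowered text at k"
lemma cond_iff (ow t : List Char) (k : Nat) :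
    (ow.length = (PySem.List.slice t (some (k : Int)) (some ((k : Int) + (ow.length : Int)))).length ∧
      PySem.Chars.lower (PySem.List.slice t (some (k : Int)) (some ((k : Int) + (ow.length : Int)))) =
        PySem.Chars.lower ow)
    ↔ PySem.Chars.lower ow <+: (PySem.Chars.lower t).drop k := by
  rw [PySem.List.slice_natCast_add, List.prefix_iff_eq_take]
  simp only [lower_eq_map, List.length_map, ← List.map_drop, ← List.map_take]
  constructor
  · rintro ⟨h1, h2⟩
    exact h2.symm
  · intro h
    refine ⟨?_, h.symm⟩
    have := congrArg List.length h
    simpa using this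

lemma stepA_noop (ow t : List Char) (k : Nat)
    (h : ¬ PySem.Chars.lower ow <+: (PySem.Chars.lower t).drop k) :
    lessStepA ow t (k : Int) = t := by
  simp only [lessStepA]
  rw [if_neg (fun hc => h ((cond_iff ow t k).mp hc))]

lemma fold_noop (ow t : List Char) (a b : Nat)
    (h : ∀ j : Nat, a ≤ j → j < b → ¬ PySem.Chars.lower ow <+: (PySem.Chars.lower t).drop j) :
    (PySem.List.pyRange (a : Int) (b : Int) 1).foldl (lessStepA ow) t = t := by
  induction b with
  | zero =>
    rw [PySem.List.pyRange_one_eq_nil (by exact_mod_cast Int.natCast_nonneg a)]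
    rfl
  | succ b ih =>
    by_cases hab : a ≤ b
    · rw [show ((b + 1 : Nat) : Int) = (b : Int) + 1 by push_cast; ring,
        PySem.List.pyRange_one_succ_right (by exact_mod_cast hab), List.foldl_append,
        ih (fun j hj1 hj2 => h j hj1 (by omega))]
      simpa using stepA_noop ow t b (h b hab (by omega))
    · rw [PySem.List.pyRange_one_eq_nil (by exact_mod_cast (by omega : b + 1 ≤ a))]
      rfl

-- at a matching index, A's rebuild equals B's splice
lemma stepA_match (ow t : List Char) (k : Nat)
    (h : PySem.Chars.lower ow <+: (PySem.Chars.lower t).drop k) :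
    lessStepA ow t (k : Int) =
      t.take k ++ (((PySem.Chars.lower ow).zip ((t.drop k).take ow.length)).map
          (fun p => if PySem.Chars.isIn [p.1] pvVowels then '*' else p.2))
        ++ t.drop (k + ow.length) := by
  have hc := (cond_iff ow t k).mpr h
  have hw : PySem.Chars.lower ow =
      (PySem.List.slice t (some (k : Int)) (some ((k : Int) + (ow.length : Int)))).map
        PySem.Chars.lowerChar := by
    rw [← lower_eq_map, hc.2]
  rw [lower_eq_map, PySem.List.slice_natCast_add] at hw
  simp only [lessStepA]
  rw [if_pos hc, PySem.List.slice_zero_start, PySem.List.slice_to_natCast, hideVowelA_eq_map,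
    PySem.List.slice_natCast_add,
    show ((k : Int) + (ow.length : Int)) = ((k + ow.length : Nat) : Int) by push_cast; ring,
    PySem.List.slice_from_natCast]
  congr 1
  congr 1
  calc ((t.drop k).take ow.length).map starA
      = ((((t.drop k).take ow.length).map (fun c => (PySem.Chars.lowerChar c, id c))).map
          (fun p => if PySem.Chars.isIn [p.1] pvVowels then '*' else p.2)) := by
        rw [List.map_map]; rfl
    _ = (((((t.drop k).take ow.length).map PySem.Chars.lowerChar)).zip
          (((t.drop k).take ow.length).map id)).map
          (fun p => if PySem.Chars.isIn [p.1] pvVowels then '*' else p.2) := by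
        rw [List.zip_map']
    _ = ((PySem.Chars.lower ow).zip ((t.drop k).take ow.length)).map
          (fun p => if PySem.Chars.isIn [p.1] pvVowels then '*' else p.2) := by
        rw [lower_eq_map, hw, List.map_id]

-- lo.zip W as a single map over W, when lo is the lowered W
lemma zip_lower_eq_map (W lo : List Char)
    (hw : W.map PySem.Chars.lowerChar = lo) :
    lo.zip W = W.map (fun c => (PySem.Chars.lowerChar c, c)) := by
  rw [← hw]
  have h := List.zip_map' (f := PySem.Chars.lowerChar) (g := id) (l := W)
  simpa using h

-- lowering B's starred window gives the starred pattern
lemma splice_lower (W lo : List Char)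
    (hw : W.map PySem.Chars.lowerChar = lo) :
    ((lo.zip W).map (fun p => if PySem.Chars.isIn [p.1] pvVowels then '*' else p.2)).map
        PySem.Chars.lowerChar
      = lo.map (fun c => if PySem.Chars.isIn [c] pvVowels then '*' else c) := by
  rw [zip_lower_eq_map W lo hw, List.map_map, List.map_map, ← hw, List.map_map]
  congr 1
  funext c
  exact lowerChar_starA c

lemma main_loop (ow : List Char) :
    ∀ (fuel : Nat) (chars : List Char) (start : Nat), chars.length < fuel + start →
      goB (PySem.Chars.lower ow)
          ((PySem.Chars.lower ow).map (fun c => if PySem.Chars.isIn [c] pvVowels then '*' else c))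
          fuel chars (PySem.Chars.lower chars) start
        = (PySem.List.pyRange (start : Int) (chars.length : Int) 1).foldl (lessStepA ow) chars := by
  intro fuel
  induction fuel with
  | zero =>
    intro chars start hb
    rw [PySem.List.pyRange_one_eq_nil (by exact_mod_cast Nat.le_of_lt (by omega : chars.length < start))]
    rfl
  | succ fuel ih =>
    intro chars start hb
    have hlow : (PySem.Chars.lower chars).length = chars.length := by
      simp [lower_eq_map]
    by_cases hs : start ≤ (PySem.Chars.lower chars).length
    · simp only [goB]
      rw [if_pos hs]
      by_cases hi : PySem.Chars.findFrom (PySem.Chars.lower chars) (PySem.Chars.lower ow) (start : Int) none = -1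
      · rw [if_pos hi]
        refine (fold_noop ow chars start chars.length ?_).symm
        intro j hj1 hj2 hpre
        have hni := (PySem.Chars.findFrom_natCast_eq_neg_one_iff (PySem.Chars.lower chars)
          (PySem.Chars.lower ow) start hs).mp hi
        refine hni (hpre.isInfix.trans ?_)
        have hdd : ((PySem.Chars.lower chars).drop start).drop (j - start)
            = (PySem.Chars.lower chars).drop j := by
          rw [List.drop_drop]; congr 1; omega
        exact hdd ▸ (List.drop_suffix (j - start) ((PySem.Chars.lower chars).drop start)).isInfix
      · rw [if_neg hi]
        obtain ⟨hge, hpre, hmin⟩ := PySem.Chars.findFrom_natCast_spec (PySem.Chars.lower chars)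
          (PySem.Chars.lower ow) start hs hi
        have hipos : (0 : Int) ≤ PySem.Chars.findFrom (PySem.Chars.lower chars)
            (PySem.Chars.lower ow) (start : Int) none :=
          le_trans (Int.natCast_nonneg start) hge
        set k := (PySem.Chars.findFrom (PySem.Chars.lower chars)
            (PySem.Chars.lower ow) (start : Int) none).toNat with hkdef
        have hik : PySem.Chars.findFrom (PySem.Chars.lower chars)
            (PySem.Chars.lower ow) (start : Int) none = (k : Int) :=
          (Int.toNat_of_nonneg hipos).symm
        have hsk : start ≤ k := by omega
        have hkn : k ≤ chars.length := by
          have hf := PySem.Chars.findFrom_natCast (PySem.Chars.lower chars)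
            (PySem.Chars.lower ow) start hs
          rw [if_neg (by omega : ¬ PySem.Chars.find ((PySem.Chars.lower chars).drop start)
            (PySem.Chars.lower ow) = -1), hik] at hf
          have hfl := PySem.Chars.find_le_length ((PySem.Chars.lower chars).drop start)
            (PySem.Chars.lower ow)
          have h2 : (k : Int) ≤ (start : Int) + (((PySem.Chars.lower chars).drop start).length : Int) := by
            rw [hf]
            linarith
          have h3 : k ≤ start + ((PySem.Chars.lower chars).drop start).length := by exact_mod_cast h2
          rw [List.length_drop, hlow] at h3
          omega
        have hm : k + (PySem.Chars.lower ow).length ≤ chars.length := by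
          have := hpre.length_le
          simp [hlow] at this ⊢
          omega
        have hw : ((chars.drop k).take (PySem.Chars.lower ow).length).map PySem.Chars.lowerChar
            = PySem.Chars.lower ow := by
          have htk := (List.prefix_iff_eq_take.mp hpre)
          rw [List.map_take, List.map_drop]
          exact htk.symm
        -- rewrite the slices in the recursive call
        rw [hik, PySem.List.slice_to_natCast, PySem.List.slice_to_natCast,
          PySem.List.slice_natCast_add,
          show ((k : Int) + ((PySem.Chars.lower ow).length : Int))
            = ((k + (PySem.Chars.lower ow).length : Nat) : Int) by push_cast; ring,
          PySem.List.slice_from_natCast, PySem.List.slice_from_natCast]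
        set W := (chars.drop k).take (PySem.Chars.lower ow).length with hWdef
        set C' := chars.take k
            ++ (((PySem.Chars.lower ow).zip W).map
                (fun p => if PySem.Chars.isIn [p.1] pvVowels then '*' else p.2))
            ++ chars.drop (k + (PySem.Chars.lower ow).length) with hCdef
        have hWlen : W.length = (PySem.Chars.lower ow).length := by
          rw [hWdef]
          simp
          omega
        have hClen : C'.length = chars.length := by
          rw [hCdef]
          simp [hWlen]
          omega
        have hmid := splice_lower W (PySem.Chars.lower ow) hw
        have hol : (PySem.Chars.lower ow).length = ow.length := by simp [lower_eq_map]
        have hClow : (PySem.Chars.lower chars).take k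
            ++ (PySem.Chars.lower ow).map (fun c => if PySem.Chars.isIn [c] pvVowels then '*' else c)
            ++ (PySem.Chars.lower chars).drop (k + (PySem.Chars.lower ow).length)
            = PySem.Chars.lower C' := by
          rw [hCdef]
          simp only [lower_eq_map, List.map_append, List.map_take, List.map_drop]
          simp only [lower_eq_map] at hmid
          rw [hmid]
        -- A side: split the range at k, discard the non-matching prefix
        rw [PySem.List.pyRange_one_append (start : Int) (k : Int) (chars.length : Int)
            (by exact_mod_cast hsk) (by exact_mod_cast hkn),
          List.foldl_append,
          fold_noop ow chars start k (fun j hj1 hj2 => hmin j hj1 hj2)]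
        by_cases hklt : k < chars.length
        · rw [PySem.List.pyRange_one_cons (by exact_mod_cast hklt : (k : Int) < (chars.length : Int)),
            List.foldl_cons, stepA_match ow chars k hpre,
            hClow, ih C' (k + 1) (by omega), hClen,
            show ((k + 1 : Nat) : Int) = (k : Int) + 1 by push_cast; ring]
          congr 1
          rw [hCdef, hWdef, hol]
        · -- k = chars.length: the matched pattern is empty, nothing changes
          have hkeq : k = chars.length := by omega
          have hm0 : (PySem.Chars.lower ow).length = 0 := by omega
          have hlo : PySem.Chars.lower ow = [] := List.length_eq_zero_iff.mp hm0
          rw [hClow, ih C' (k + 1) (by omega), hClen,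
            PySem.List.pyRange_one_eq_nil (by exact_mod_cast (by omega : chars.length ≤ k + 1)),
            PySem.List.pyRange_one_eq_nil (by exact_mod_cast (by omega : chars.length ≤ k))]
          simp only [List.foldl_nil]
          rw [hCdef, hlo]
          simp [hkeq]
    · simp only [goB]
      rw [if_neg hs]
      rw [PySem.List.pyRange_one_eq_nil (by exact_mod_cast Nat.le_of_lt (by omega : chars.length < start))]
      rfl

-- ===== VERDICT (by name: the statement is the Claim_ definition above) =====
theorem less_offensive_spec : Claim_equal_less_offensive := by
  intro t oword _
  unfold Spec_less_offensive less_offensive less_offensive_alt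
  have h := main_loop oword.toList (t.toList.length + 1) t.toList 0 (by omega)
  simp only [Nat.cast_zero] at h
  exact congrArg String.ofList h.symm
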